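-- pv_equiv track=rewrite | github.com/sebastiengiordano/Coding_Game | Shadows of the Knight - Episode 2/__main__.py | set_distance_list
-- ===== SOURCE A (Python) =====
-- def set_distance_list (width, height):
--     # base = []
--     computed_dist = []
--     # for x in range(0, max( width, height )):
--     #     base.append(x**2)
--     base = list((x**2 for x in range(0, max( width, height ))))
--     if width > height:
--         b = base[:height]
--         for x in range(0, width):
--             computed_dist.append(list(i+base[x] for i in b))
--     else:
--         for x in range(0, width):
--             computed_dist.append(list(i+base[x] for i in base))
--     return computed_dist
-- ===== SOURCE B (Python) =====
-- def set_distance_list(width, height):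
--     # Finite differences: y^2 accumulates odd increments; each next row adds the
--     # next odd number (2x+1) to every cell of the previous row.  No squaring at all.
--     rows = []
--     row = []
--     sq = 0
--     for y in range(height):
--         row.append(sq)
--         sq += 2 * y + 1
--     delta = 1
--     for _ in range(width):
--         rows.append(row)
--         row = [v + delta for v in row]
--         delta += 2
--     return rows
-- ===== Notes on version B (the rewrite author's own statement) =====
-- stated objective: alternative
-- what changed: B replaces A's precomputed squares table and sliced second pass by a finite-differences scheme: the first row accumulates consecutive odd numbers to produce y^2 without multiplying, and each subsequent row is the previous row plus the next odd increment 2x+1, so no square is ever computed directly.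
-- intended difference: For height < 0 with width + height > 0, A's slice base[:height] wraps around (negative slice bound) and returns width rows of width+height spurious values, while B returns width empty rows, the intended distance table for a board with no columns. — e.g. on set_distance_list(2, -1): A returns [[0], [1]], B returns [[], []]
import Mathlib
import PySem

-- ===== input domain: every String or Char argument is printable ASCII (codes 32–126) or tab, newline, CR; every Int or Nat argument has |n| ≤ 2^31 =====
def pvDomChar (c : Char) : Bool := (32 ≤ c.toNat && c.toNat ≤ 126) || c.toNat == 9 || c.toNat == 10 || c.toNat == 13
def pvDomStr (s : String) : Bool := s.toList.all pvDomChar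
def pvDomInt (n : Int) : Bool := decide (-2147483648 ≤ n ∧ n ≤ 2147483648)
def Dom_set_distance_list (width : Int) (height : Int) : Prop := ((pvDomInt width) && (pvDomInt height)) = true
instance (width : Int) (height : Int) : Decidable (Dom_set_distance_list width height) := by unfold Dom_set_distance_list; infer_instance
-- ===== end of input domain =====

-- B replaces A's precomputed squares table and two-branch sliced second pass by a
-- finite-differences scheme (first row accumulates odd numbers, each next row adds the
-- next odd increment to the previous row); on height < 0 < width + height the two
-- differ (see D_ below).

-- ===== PORT A =====
def set_distance_list (width : Int) (height : Int) : List (List Int) :=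
  let base := (PySem.List.pyRange 0 (max width height) 1).map (fun x => x ^ 2)
  if width > height then
    let b := PySem.List.slice base none (some height)
    (PySem.List.pyRange 0 width 1).foldl
      (fun acc x => acc ++ [b.map (fun i => i + PySem.List.pyGetD base x 0)]) []
  else
    (PySem.List.pyRange 0 width 1).foldl
      (fun acc x => acc ++ [base.map (fun i => i + PySem.List.pyGetD base x 0)]) []

-- ===== PORT B =====
-- Python's range() is lazy, so Source B's two for-loops are ported as counter recursions
-- (no range list is materialized); each list.append accumulator is kept reversed and
-- reversed once at the end — the standard linear-time transliteration of append.
def pvRowAux : Nat → Int → Int → List Int → List Int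
  | 0, _, _, acc => acc.reverse
  | n + 1, y, sq, acc => pvRowAux n (y + 1) (sq + (2 * y + 1)) (sq :: acc)

def pvRowsAux : Nat → List Int → Int → List (List Int) → List (List Int)
  | 0, _, _, acc => acc.reverse
  | n + 1, row, delta, acc => pvRowsAux n (row.map (fun v => v + delta)) (delta + 2) (row :: acc)

def set_distance_list_alt (width : Int) (height : Int) : List (List Int) :=
  pvRowsAux width.toNat (pvRowAux height.toNat 0 0 []) 1 []

-- ===== PRECONDITION & SPEC =====
-- For height < 0 with width + height > 0, A's slice base[:height] wraps around (negative slice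
-- bound) and returns width rows of width+height spurious values, while B returns width empty
-- rows, the intended distance table for a board with no columns.
def D_set_distance_list (width : Int) (height : Int) : Prop :=
  height < 0 ∧ 0 < width + height
instance (width : Int) (height : Int) : Decidable (D_set_distance_list width height) := by unfold D_set_distance_list; infer_instance

def Spec_set_distance_list (width : Int) (height : Int) (out : List (List Int)) : Prop := ¬ D_set_distance_list width height → out = set_distance_list_alt width height
instance (width : Int) (height : Int) (out : List (List Int)) : Decidable (Spec_set_distance_list width height out) := by unfold Spec_set_distance_list; infer_instance

def pvDiffWitness_set_distance_list : Int × Int := (2, -1)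
def pvDiffWitnessOut_set_distance_list : (List (List Int)) × (List (List Int)) :=
  ([[0], [1]], [[], []])

-- ===== CLAIM (what is proved, stated in full; the proofs are below) =====
def Claim_unchanged_set_distance_list : Prop := ∀ (width : Int) (height : Int), Dom_set_distance_list width height → Spec_set_distance_list width height (set_distance_list width height)
def Claim_changed_set_distance_list : Prop := Dom_set_distance_list (pvDiffWitness_set_distance_list.1) (pvDiffWitness_set_distance_list.2) ∧ D_set_distance_list (pvDiffWitness_set_distance_list.1) (pvDiffWitness_set_distance_list.2) ∧ set_distance_list (pvDiffWitness_set_distance_list.1) (pvDiffWitness_set_distance_list.2) = pvDiffWitnessOut_set_distance_list.1 ∧ set_distance_list_alt (pvDiffWitness_set_distance_list.1) (pvDiffWitness_set_distance_list.2) = pvDiffWitnessOut_set_distance_list.2 ∧ pvDiffWitnessOut_set_distance_list.1 ≠ pvDiffWitnessOut_set_distance_list.2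
def Claim_exact_set_distance_list : Prop := ∀ (width : Int) (height : Int), Dom_set_distance_list width height → D_set_distance_list width height → set_distance_list width height ≠ set_distance_list_alt width height

-- ===== LEMMAS AND PROOFS =====

-- xs[:h] for negative h, written without the natCast form
theorem pv_slice_neg {α : Type} (xs : List α) (h : Int) (hh : h < 0) :
    PySem.List.slice xs none (some h) = xs.take (xs.length - (-h).toNat) := by
  have e := PySem.List.slice_to_neg_natCast xs (-h).toNat (by omega)
  rw [show -((((-h).toNat : Nat)) : Int) = h from by omega] at e
  exact e

-- taking the first h elements of a mapped range is mapping the shorter range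
theorem pv_take_map_pyRange (f : Int → Int) (h m : Int) (h0 : 0 ≤ h) (hm : h ≤ m) :
    ((PySem.List.pyRange 0 m 1).map f).take h.toNat = (PySem.List.pyRange 0 h 1).map f := by
  rw [PySem.List.pyRange_one_append 0 h m h0 hm, List.map_append,
      List.take_left' (by simp [PySem.List.length_pyRange_one])]

-- A as a map over range(width)
theorem pv_A_eq_map (width height : Int) :
    set_distance_list width height =
      (PySem.List.pyRange 0 width 1).map (fun x =>
        (if width > height then
            PySem.List.slice ((PySem.List.pyRange 0 (max width height) 1).map (fun x => x ^ 2)) none (some height)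
          else ((PySem.List.pyRange 0 (max width height) 1).map (fun x => x ^ 2))).map
          (fun i => i + PySem.List.pyGetD ((PySem.List.pyRange 0 (max width height) 1).map (fun x => x ^ 2)) x 0)) := by
  unfold set_distance_list
  split_ifs with h <;>
    rw [PySem.List.foldl_append_singleton_eq_map, List.nil_append]

-- B's first loop: accumulating consecutive odd numbers produces the squares
theorem pv_rowAux_gen : ∀ (n : Nat) (a : Int) (pref : List Int), 0 ≤ a →
    pvRowAux n a (a * a) pref
      = pref.reverse ++ (PySem.List.pyRange a (a + n) 1).map (fun y => y * y) := by
  intro n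
  induction n with
  | zero =>
    intro a pref ha
    rw [show a + ((0 : Nat) : Int) = a from by omega, PySem.List.pyRange_one_eq_nil le_rfl]
    simp [pvRowAux]
  | succ n ih =>
    intro a pref ha
    show pvRowAux n (a + 1) (a * a + (2 * a + 1)) (a * a :: pref)
      = pref.reverse ++ (PySem.List.pyRange a (a + ((n : Int) + 1)) 1).map (fun y => y * y)
    have hst : a * a + (2 * a + 1) = (a + 1) * (a + 1) := by ring
    rw [hst, ih (a + 1) (a * a :: pref) (by omega)]
    rw [PySem.List.pyRange_one_cons (a := a) (b := a + ((n : Int) + 1)) (by omega)]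
    rw [show a + 1 + (n : Int) = a + ((n : Int) + 1) from by omega]
    simp [List.append_assoc]

-- the first loop produces the squares of range(height)
theorem pv_fold1 (h : Int) :
    pvRowAux h.toNat 0 0 [] = (PySem.List.pyRange 0 h 1).map (fun y => y * y) := by
  have e := pv_rowAux_gen h.toNat 0 [] le_rfl
  simp only [Int.mul_zero, Int.zero_add] at e
  by_cases hh : 0 ≤ h
  · rw [show ((h.toNat : Nat) : Int) = h from by omega] at e
    simpa using e
  · rw [PySem.List.pyRange_one_eq_nil (by omega)]
    rw [show h.toNat = 0 from by omega] at e ⊢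
    simpa using e

-- the second loop: each step emits the current row and bumps every cell by the next odd number
theorem pv_rowsAux_gen : ∀ (n k : Nat) (r : List Int),
    pvRowsAux n (r.map (fun v => v + (k : Int) * (k : Int))) (2 * (k : Int) + 1)
        (((List.range k).map (fun (j : Nat) => r.map (fun v => v + (j : Int) * (j : Int)))).reverse)
      = (List.range (k + n)).map (fun (j : Nat) => r.map (fun v => v + (j : Int) * (j : Int))) := by
  intro n
  induction n with
  | zero => intro k r; simp [pvRowsAux]
  | succ n ih =>
    intro k r
    show pvRowsAux n ((r.map (fun v => v + (k : Int) * (k : Int))).map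
          (fun v => v + (2 * (k : Int) + 1))) (2 * (k : Int) + 1 + 2)
        (r.map (fun v => v + (k : Int) * (k : Int))
          :: ((List.range k).map (fun (j : Nat) => r.map (fun v => v + (j : Int) * (j : Int)))).reverse)
      = _
    have h1 : r.map (fun v => v + (k : Int) * (k : Int))
          :: ((List.range k).map (fun (j : Nat) => r.map (fun v => v + (j : Int) * (j : Int)))).reverse
        = ((List.range (k + 1)).map
            (fun (j : Nat) => r.map (fun v => v + (j : Int) * (j : Int)))).reverse := by
      rw [List.range_succ, List.map_append, List.reverse_append]; rfl
    have h2 : (r.map (fun v => v + (k : Int) * (k : Int))).map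
          (fun v => v + (2 * (k : Int) + 1))
        = r.map (fun v => v + ((k + 1 : Nat) : Int) * ((k + 1 : Nat) : Int)) := by
      rw [List.map_map]
      apply List.map_congr_left; intro v _
      simp only [Function.comp_apply]; push_cast; ring
    have h3 : 2 * (k : Int) + 1 + 2 = 2 * ((k + 1 : Nat) : Int) + 1 := by push_cast; ring
    rw [h1, h2, h3, ih (k + 1) r]
    have : k + 1 + n = k + (n + 1) := by omega
    rw [this]

-- B as a map over range(width): row x = row0 shifted by x^2
theorem pv_B_eq_map (width height : Int) :
    set_distance_list_alt width height =
      (List.range width.toNat).map (fun (j : Nat) =>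
        ((PySem.List.pyRange 0 height 1).map (fun y => y * y)).map
          (fun v => v + (j : Int) * (j : Int))) := by
  unfold set_distance_list_alt
  rw [pv_fold1]
  have e := pv_rowsAux_gen width.toNat 0 ((PySem.List.pyRange 0 height 1).map (fun y => y * y))
  simpa using e

theorem set_distance_list_spec : Claim_unchanged_set_distance_list := by
  intro width height _ hd
  unfold D_set_distance_list at hd
  rw [pv_A_eq_map, pv_B_eq_map]
  rw [PySem.List.pyRange_one 0 width, List.map_map]
  simp only [Int.sub_zero]
  apply List.map_congr_left
  intro j hj
  rw [List.mem_range] at hj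
  have hx0 : (0 : Int) ≤ (j : Int) := by positivity
  have hxw : (j : Int) < width := by omega
  simp only [Function.comp]
  have hget : PySem.List.pyGetD
      ((PySem.List.pyRange 0 (max width height) 1).map (fun x => x ^ 2)) (0 + (j : Int)) 0
      = (0 + (j : Int)) ^ 2 :=
    PySem.List.pyGetD_map_pyRange_of_nonneg _ _ _ _ (by omega)
      (lt_of_lt_of_le (by omega) (le_max_left _ _))
  rw [hget]
  by_cases hwh : width > height
  · rw [if_pos hwh]
    by_cases hh : 0 ≤ height
    · rw [PySem.List.slice_to _ hh, pv_take_map_pyRange _ _ _ hh (le_max_right _ _),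
          List.map_map, List.map_map]
      apply List.map_congr_left; intro y _; simp; ring
    · -- height < 0 and (by ¬D_) width + height ≤ 0: both rows are empty
      have hempty : PySem.List.pyRange 0 height 1 = [] :=
        PySem.List.pyRange_one_eq_nil (by omega)
      rw [hempty, pv_slice_neg _ _ (by omega)]
      have hlen : ((PySem.List.pyRange 0 (max width height) 1).map (fun x => x ^ 2)).length
          - (-height).toNat = 0 := by
        simp [PySem.List.length_pyRange_one]; omega
      rw [hlen, List.take_zero, List.map_nil, List.map_nil]
      rfl
  · rw [if_neg hwh]
    have hmax : max width height = height := by omega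
    rw [hmax, List.map_map, List.map_map]
    apply List.map_congr_left; intro y _; simp; ring

theorem set_distance_list_tight : Claim_exact_set_distance_list := by
  intro width height _ hd heq
  obtain ⟨hh, hwh⟩ := hd
  have hw : 0 < width := by omega
  rw [pv_A_eq_map, pv_B_eq_map] at heq
  -- B's rows are all empty since range(height) is empty
  rw [PySem.List.pyRange_one_eq_nil (le_of_lt hh)] at heq
  simp only [List.map_nil] at heq
  rw [List.map_const', List.length_range] at heq
  -- compare the first rows
  have hA : PySem.List.pyRange 0 width 1 = 0 :: PySem.List.pyRange 1 width 1 := by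
    have := PySem.List.pyRange_one_cons (a := 0) (b := width) (by omega)
    simpa using this
  rw [hA, List.map_cons, show width.toNat = width.toNat - 1 + 1 from by omega,
      List.replicate_succ] at heq
  have hrow : (if width > height then
        PySem.List.slice ((PySem.List.pyRange 0 (max width height) 1).map (fun x => x ^ 2))
          none (some height)
      else ((PySem.List.pyRange 0 (max width height) 1).map (fun x => x ^ 2))).map
        (fun i => i + PySem.List.pyGetD
          ((PySem.List.pyRange 0 (max width height) 1).map (fun x => x ^ 2)) 0 0)
      = ([] : List Int) := (List.cons_eq_cons.mp heq).1
  rw [if_pos (by omega), pv_slice_neg _ _ hh] at hrow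
  have := congrArg List.length hrow
  simp [PySem.List.length_pyRange_one] at this
  omega

-- ===== VERDICT (by name: the statement is the Claim_ definition above) =====
theorem set_distance_list_changed : Claim_changed_set_distance_list := by unfold Claim_changed_set_distance_list; decide
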